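-- pv_equiv track=rewrite | github.com/yunusemreayyildiz/Computer-Price-Estimation | src/price_prediction/feature_extraction.py | getModelBrandGPU
-- ===== SOURCE A (Python) =====
-- def getModelBrandGPU(model):
--     model = model.replace("-"," ").lower().strip()
--     model = model.split()
--     nvidiaWords = ["rtx","gtx","geforce","ti","super","titan"]
--     amdWords = ["rx","radeon","vega","xt"]
--     intelWords = ["arc"]
--     appleWords = ["apple"]
--     wordCount = {"NVIDIA":0, "AMD":0, "Intel":0, "Apple":0}
--     for word in model:
--         if word in nvidiaWords:
--             wordCount["NVIDIA"] += 1
--         if word in amdWords: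
--             wordCount["AMD"] += 1
--         if word in intelWords:
--             wordCount["Intel"] += 1
--         if word in appleWords:
--             wordCount["Apple"] += 1
--     maxValue = max(wordCount.values())
--     if maxValue > 0:
--         return list(wordCount.keys())[list(wordCount.values()).index(maxValue)]
--     else:
--         return None
-- ===== SOURCE B (Python) =====
-- def getModelBrandGPU(model):
--     words = model.replace("-", " ").lower().strip().split()
--     best = None
--     bestCount = 0
--     for brand, keywords in (
--         ("NVIDIA", ("rtx", "gtx", "geforce", "ti", "super", "titan")),
--         ("AMD", ("rx", "radeon", "vega", "xt")),
--         ("Intel", ("arc",)),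
--         ("Apple", ("apple",)),
--     ):
--         count = sum(words.count(k) for k in keywords)
--         if count > bestCount:
--             best, bestCount = brand, count
--     return best
-- ===== Notes on version B (the rewrite author's own statement) =====
-- stated objective: simpler
-- what changed: B replaces A's per-word loop over four independent membership tests plus the final keys/values/index-of-max dance with a single running-argmax fold over (brand, keywords) pairs, counting each brand via list.count per keyword; the strict > comparison preserves A's first-brand tie-break.
import Mathlib
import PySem

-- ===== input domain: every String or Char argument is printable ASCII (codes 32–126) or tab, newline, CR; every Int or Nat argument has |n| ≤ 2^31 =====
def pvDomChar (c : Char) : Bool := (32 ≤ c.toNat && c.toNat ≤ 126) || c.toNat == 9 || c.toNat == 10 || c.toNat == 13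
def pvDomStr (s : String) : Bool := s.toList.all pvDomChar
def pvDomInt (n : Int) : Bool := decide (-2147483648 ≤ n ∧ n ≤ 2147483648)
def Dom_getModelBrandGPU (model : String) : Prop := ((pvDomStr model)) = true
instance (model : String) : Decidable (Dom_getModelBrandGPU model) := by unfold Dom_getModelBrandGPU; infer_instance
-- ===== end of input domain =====

-- B replaces the word-loop over four independent membership tests and the final
-- keys/values/index dance by a single running-argmax pass over (brand, keywords)
-- pairs, counting each brand's keywords with list.count (objective: simpler).

-- ===== PORT A =====
-- body of A's for-loop: the four independent membership tests, each bumping its brand's count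
def pvStepA (d : PySem.Dict String Int) (word : String) : PySem.Dict String Int :=
  let d := if word ∈ ["rtx","gtx","geforce","ti","super","titan"] then PySem.Dict.modify d "NVIDIA" 0 (· + 1) else d
  let d := if word ∈ ["rx","radeon","vega","xt"] then PySem.Dict.modify d "AMD" 0 (· + 1) else d
  let d := if word ∈ ["arc"] then PySem.Dict.modify d "Intel" 0 (· + 1) else d
  let d := if word ∈ ["apple"] then PySem.Dict.modify d "Apple" 0 (· + 1) else d
  d

def getModelBrandGPU (model : String) : Option String :=
  let m := PySem.Str.split₀ (PySem.Str.strip (PySem.Str.lower (PySem.Str.replace model "-" " ")))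
  let wordCount := m.foldl pvStepA (PySem.Dict.mk [("NVIDIA",0),("AMD",0),("Intel",0),("Apple",0)])
  match PySem.List.max? (PySem.Dict.values wordCount) (fun v => v) with
  | none => none
  | some maxValue =>
    if maxValue > 0 then
      match PySem.List.index? (PySem.Dict.values wordCount) maxValue with
      | none => none  -- unreachable: maxValue occurs in the values
      | some i => PySem.List.pyGet? (PySem.Dict.keys wordCount) (i : Int)
    else none

-- ===== PORT B =====
def pvBrandsB : List (String × List String) :=
  [("NVIDIA", ["rtx","gtx","geforce","ti","super","titan"]),
   ("AMD", ["rx","radeon","vega","xt"]),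
   ("Intel", ["arc"]),
   ("Apple", ["apple"])]

def getModelBrandGPU_alt (model : String) : Option String :=
  let words := PySem.Str.split₀ (PySem.Str.strip (PySem.Str.lower (PySem.Str.replace model "-" " ")))
  (pvBrandsB.foldl
    (fun (acc : Option String × Int) bk =>
      let c : Int := (bk.2.map (fun k => (PySem.List.count words k : Int))).sum
      if c > acc.2 then (some bk.1, c) else acc)
    (none, 0)).1

-- ===== PRECONDITION & SPEC =====
def Spec_getModelBrandGPU (model : String) (out : Option String) : Prop := out = getModelBrandGPU_alt model
instance (model : String) (out : Option String) : Decidable (Spec_getModelBrandGPU model out) := by unfold Spec_getModelBrandGPU; infer_instance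

-- ===== CLAIM (what is proved, stated in full; the proofs are below) =====
def Claim_equal_getModelBrandGPU : Prop := ∀ (model : String), Dom_getModelBrandGPU model → Spec_getModelBrandGPU model (getModelBrandGPU model)

-- ===== LEMMAS AND PROOFS =====

theorem pv_modify_concrete (a b c d : Int) (k : String)
    (h : k = "NVIDIA" ∨ k = "AMD" ∨ k = "Intel" ∨ k = "Apple") :
    PySem.Dict.modify (PySem.Dict.mk [("NVIDIA",a),("AMD",b),("Intel",c),("Apple",d)]) k 0 (· + 1) =
    PySem.Dict.mk [("NVIDIA", if k = "NVIDIA" then a+1 else a),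
                   ("AMD", if k = "AMD" then b+1 else b),
                   ("Intel", if k = "Intel" then c+1 else c),
                   ("Apple", if k = "Apple" then d+1 else d)] := by
  rcases h with h|h|h|h <;> subst h <;>
    simp [PySem.Dict.modify, PySem.Dict.insert, PySem.Dict.contains, PySem.Dict.getD,
      PySem.Dict.get?, List.find?]

theorem pv_hstep (w : String) (a b c d : Int) :
    pvStepA (PySem.Dict.mk [("NVIDIA",a),("AMD",b),("Intel",c),("Apple",d)]) w =
    PySem.Dict.mk
      [("NVIDIA", a + if w ∈ ["rtx","gtx","geforce","ti","super","titan"] then 1 else 0),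
       ("AMD",    b + if w ∈ ["rx","radeon","vega","xt"] then 1 else 0),
       ("Intel",  c + if w ∈ ["arc"] then 1 else 0),
       ("Apple",  d + if w ∈ ["apple"] then 1 else 0)] := by
  by_cases h1 : w ∈ ["rtx","gtx","geforce","ti","super","titan"] <;>
  by_cases h2 : w ∈ ["rx","radeon","vega","xt"] <;>
  by_cases h3 : w ∈ ["arc"] <;>
  by_cases h4 : w ∈ ["apple"] <;>
  simp_all [pvStepA, pv_modify_concrete]

theorem pv_loopA (ws : List String) (a b c d : Int) :
    ws.foldl pvStepA (PySem.Dict.mk [("NVIDIA",a),("AMD",b),("Intel",c),("Apple",d)]) =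
    PySem.Dict.mk
      [("NVIDIA", a + (ws.countP (fun w => decide (w ∈ ["rtx","gtx","geforce","ti","super","titan"])) : Int)),
       ("AMD",    b + (ws.countP (fun w => decide (w ∈ ["rx","radeon","vega","xt"])) : Int)),
       ("Intel",  c + (ws.countP (fun w => decide (w ∈ ["arc"])) : Int)),
       ("Apple",  d + (ws.countP (fun w => decide (w ∈ ["apple"])) : Int))] := by
  induction ws generalizing a b c d with
  | nil => simp
  | cons w t ih =>
    simp only [List.foldl_cons, pv_hstep, List.countP_cons, ih]
    simp only [PySem.Dict.mk.injEq, List.cons.injEq, Prod.mk.injEq, and_true, true_and]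
    refine ⟨?_, ?_, ?_, ?_⟩ <;> split_ifs <;> simp_all <;> omega

theorem pv_countP_or (p q : String → Bool) (ws : List String)
    (h : ∀ w, ¬(p w = true ∧ q w = true)) :
    ws.countP (fun w => p w || q w) = ws.countP p + ws.countP q := by
  induction ws with
  | nil => simp
  | cons w t ih =>
    simp only [List.countP_cons, ih]
    have := h w
    cases hp : p w <;> cases hq : q w <;> simp_all <;> omega

theorem pv_sum_counts (ks : List String) (hk : ks.Nodup) (ws : List String) :
    (ks.map (fun k => (PySem.List.count ws k : Int))).sum =
    (ws.countP (fun w => decide (w ∈ ks)) : Int) := by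
  induction ks with
  | nil => simp
  | cons k t ih =>
    have hd : ∀ w, ¬((decide (w = k)) = true ∧ (decide (w ∈ t)) = true) := by
      intro w ⟨h1, h2⟩
      simp at h1 h2
      exact (List.nodup_cons.mp hk).1 (h1 ▸ h2)
    have : ws.countP (fun w => decide (w ∈ (k :: t))) =
        ws.countP (fun w => decide (w = k)) + ws.countP (fun w => decide (w ∈ t)) := by
      rw [← pv_countP_or _ _ ws hd]
      apply List.countP_congr
      intro w _
      simp
    rw [List.map_cons, List.sum_cons, this, ih (List.nodup_cons.mp hk).2]
    have hc : PySem.List.count ws k = ws.countP (fun w => decide (w = k)) := by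
      simp only [PySem.List.count, List.count_eq_countP]
      apply List.countP_congr
      intro w _
      rw [Bool.eq_iff_iff]
      simp
    rw [hc]; push_cast; ring

set_option maxHeartbeats 1000000 in
theorem pv_final_eq (x y z w : Nat) :
    (match PySem.List.max? [(x:Int),(y:Int),(z:Int),(w:Int)] (fun v => v) with
     | none => none
     | some maxValue =>
       if maxValue > 0 then
         match PySem.List.index? [(x:Int),(y:Int),(z:Int),(w:Int)] maxValue with
         | none => none
         | some i => PySem.List.pyGet? ["NVIDIA","AMD","Intel","Apple"] (i : Int)
       else none)
    =
    (([(("NVIDIA":String), (x:Int)), ("AMD", (y:Int)), ("Intel", (z:Int)), ("Apple", (w:Int))].foldl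
      (fun (acc : Option String × Int) bk => if bk.2 > acc.2 then (some bk.1, bk.2) else acc)
      (none, 0)).1) := by
  simp only [PySem.List.max?, PySem.List.index?, List.foldl_cons, List.foldl_nil, List.idxOf?,
    List.findIdx?_cons, List.findIdx?_nil]
  by_cases h0 : x = 0 ∧ y = 0 ∧ z = 0 ∧ w = 0
  · obtain ⟨hx, hy, hz, hw⟩ := h0
    subst hx; subst hy; subst hz; subst hw
    decide
  · by_cases c1 : y ≤ x ∧ z ≤ x ∧ w ≤ x
    · obtain ⟨h2, h3, h4⟩ := c1
      have hx : 0 < x := by omega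
      have e1 : ¬ ((x:Int) < y) := by omega
      have e2 : ¬ ((x:Int) < z) := by omega
      have e3 : ¬ ((x:Int) < w) := by omega
      have e4 : (0:Int) < x := by omega
      have e5 : ¬ ((y:Int) > x) := by omega
      have e6 : ¬ ((z:Int) > x) := by omega
      have e7 : ¬ ((w:Int) > x) := by omega
      simp only [Prod.fst, Prod.snd] at *
      simp [e1, e2, e3, e4, e5, e6, e7, PySem.List.pyGet?, PySem.List.pyIdx?] <;> split_ifs <;> simp_all <;> omega
    · by_cases c2 : x < y ∧ z ≤ y ∧ w ≤ y
      · obtain ⟨h2, h3, h4⟩ := c2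
        have e1 : ((x:Int) < y) := by omega
        have e2 : ¬ ((y:Int) < z) := by omega
        have e3 : ¬ ((y:Int) < w) := by omega
        have e4 : (0:Int) < y := by omega
        have e5 : ¬ ((x:Int) = y) := by omega
        have e6 : ¬ ((z:Int) > y) := by omega
        have e7 : ¬ ((w:Int) > y) := by omega
        have e8 : ((y:Int) > if (0:Int) < x then (x:Int) else 0) := by split_ifs <;> omega
        simp only [Prod.fst, Prod.snd] at *
        simp [e1, e2, e3, e4, e5, e6, e7, e8, PySem.List.pyGet?, PySem.List.pyIdx?] <;> split_ifs <;> simp_all <;> omega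
      · by_cases c3 : x < z ∧ y < z ∧ w ≤ z
        · obtain ⟨h2, h3, h4⟩ := c3
          have e1 : ((x:Int) < z ∨ (y:Int) < z) := by omega
          have e2 : ¬ ((z:Int) < w) := by omega
          have e4 : (0:Int) < z := by omega
          have e5 : ¬ ((x:Int) = z) := by omega
          have e5' : ¬ ((y:Int) = z) := by omega
          have e6 : ¬ ((w:Int) > z) := by omega
          have emax : (if (x:Int) < y then (y:Int) else x) < z := by split_ifs <;> omega
          have eacc : ((z:Int) > (if (y:Int) > (if (0:Int) < x then (x:Int) else 0) then (y:Int) else if (0:Int) < x then (x:Int) else 0)) := by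
            split_ifs <;> omega
          simp only [Prod.fst, Prod.snd] at *
          split_ifs <;> simp_all [PySem.List.pyGet?, PySem.List.pyIdx?] <;> (try split_ifs) <;> (try simp_all [PySem.List.pyGet?, PySem.List.pyIdx?]) <;> (try split_ifs) <;> first | omega | simp_all [PySem.List.pyGet?, PySem.List.pyIdx?]
        · -- w is the strict maximum
          have h2 : x < w := by omega
          have h3 : y < w := by omega
          have h4 : z < w := by omega
          have e4 : (0:Int) < w := by omega
          have e5 : ¬ ((x:Int) = w) := by omega
          have e5' : ¬ ((y:Int) = w) := by omega
          have e5'' : ¬ ((z:Int) = w) := by omega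
          have emax : (if (if (x:Int) < y then (y:Int) else x) < z then (z:Int) else if (x:Int) < y then (y:Int) else x) < w := by
            split_ifs <;> omega
          have eacc : ((w:Int) > (if (z:Int) > (if (y:Int) > (if (0:Int) < x then (x:Int) else 0) then (y:Int) else if (0:Int) < x then (x:Int) else 0) then (z:Int) else (if (y:Int) > (if (0:Int) < x then (x:Int) else 0) then (y:Int) else if (0:Int) < x then (x:Int) else 0))) := by
            split_ifs <;> omega
          simp only [Prod.fst, Prod.snd] at *
          split_ifs <;> simp_all [PySem.List.pyGet?, PySem.List.pyIdx?] <;> (try split_ifs) <;> (try simp_all [PySem.List.pyGet?, PySem.List.pyIdx?]) <;> (try split_ifs) <;> first | omega | simp_all [PySem.List.pyGet?, PySem.List.pyIdx?]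

-- ===== VERDICT (by name: the statement is the Claim_ definition above) =====
theorem getModelBrandGPU_spec : Claim_equal_getModelBrandGPU := by
  intro model _
  unfold Spec_getModelBrandGPU
  simp only [getModelBrandGPU, getModelBrandGPU_alt, pvBrandsB]
  generalize PySem.Str.split₀ (PySem.Str.strip (PySem.Str.lower (PySem.Str.replace model "-" " "))) = ws
  rw [pv_loopA]
  simp only [List.foldl_cons, List.foldl_nil]
  simp only [pv_sum_counts ["rtx","gtx","geforce","ti","super","titan"] (by decide) ws,
    pv_sum_counts ["rx","radeon","vega","xt"] (by decide) ws,
    pv_sum_counts ["arc"] (by decide) ws,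
    pv_sum_counts ["apple"] (by decide) ws]
  simp only [PySem.Dict.values, PySem.Dict.keys, List.map_cons, List.map_nil, zero_add]
  have := pv_final_eq (ws.countP (fun w => decide (w ∈ ["rtx","gtx","geforce","ti","super","titan"])))
    (ws.countP (fun w => decide (w ∈ ["rx","radeon","vega","xt"])))
    (ws.countP (fun w => decide (w ∈ ["arc"])))
    (ws.countP (fun w => decide (w ∈ ["apple"])))
  simp only [List.foldl_cons, List.foldl_nil] at this
  exact this
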